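-- pv_equiv track=rewrite | github.com/Gaju27/Assignment_17_B | count_product_single_distinct_prime_factor.py | singlePrimeFactor
-- ===== SOURCE A (Python) =====
-- def singlePrimeFactor(N):
--     # Stores distinct
--     # prime factors of N
--     disPrimeFact = {}
--
--     # Calculate prime factor of N
--     for i in range(2, N + 1):
--         if i * i > N:
--             break
--
--         # Calculate distinct
--         # prime factor
--         while (N % i == 0):
--             # Insert i into
--             # disPrimeFact
--             disPrimeFact[i] = 1
--
--             # Update N
--             N //= i
--
--     # If N is not equal to 1
--     if (N != 1):
--         # Insert N into
--         # disPrimeFact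
--         disPrimeFact[N] = 1
--
--     # If N contains a single
--     # distinct prime factor
--     if (len(disPrimeFact) == 1):
--         # Return single distinct
--         # prime factor of N
--         return list(disPrimeFact.keys())[0]
--
--     # If N contains more than one
--     # distinct prime factor
--     return -1
-- ===== SOURCE B (Python) =====
-- def singlePrimeFactor(N):
--     # Different decomposition: stop at the SMALLEST prime factor p, divide it
--     # out into a residual M, and answer from the pair of smallest factor and residual; no dict of all factors.
--     if N < 2:
--         return -1 if N == 1 else N
--     i = 2
--     while i * i <= N:
--         if N % i == 0:
--             M = N
--             while M % i == 0:
--                 M //= i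
--             return i if M == 1 else -1
--         i += 1
--     return N
-- ===== Notes on version B (the rewrite author's own statement) =====
-- stated objective: alternative
-- what changed: Instead of collecting every distinct prime factor in a dict over the whole trial-division range, B finds only the smallest prime factor, divides it out into a residual, and decides from whether the residual has been fully divided away, exiting at the first factor found.
import Mathlib
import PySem

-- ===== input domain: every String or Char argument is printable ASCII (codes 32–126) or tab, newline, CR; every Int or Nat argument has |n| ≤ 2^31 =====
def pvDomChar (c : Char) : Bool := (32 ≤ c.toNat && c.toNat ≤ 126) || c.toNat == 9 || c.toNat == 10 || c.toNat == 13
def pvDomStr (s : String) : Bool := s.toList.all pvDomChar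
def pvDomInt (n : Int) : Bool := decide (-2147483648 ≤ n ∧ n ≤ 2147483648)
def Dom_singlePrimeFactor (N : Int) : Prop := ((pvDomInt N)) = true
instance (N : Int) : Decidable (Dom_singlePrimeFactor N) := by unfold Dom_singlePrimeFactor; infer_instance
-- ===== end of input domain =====

-- B changes the decomposition: only the smallest prime factor and the residual are kept,
-- instead of A's dict of all distinct prime factors over the full trial-division range.

-- ===== PORT A =====
-- inner 'while (N % i == 0)' of A; fuel N.natAbs always suffices (each step divides N by i ≥ 2)
def pvAWhile (fuel : Nat) (i N : Int) (d : PySem.Dict Int Int) : Int × PySem.Dict Int Int :=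
  match fuel with
  | 0 => (N, d)
  | f + 1 =>
      if PySem.Int.mod N i = 0 then
        pvAWhile f i (PySem.Int.floordiv N i) (d.insert i 1)
      else (N, d)

-- 'for i in range(2, N+1): if i*i > N: break; <while>' — i counts up to the fixed stop
def pvALoop (fuel : Nat) (i stop N : Int) (d : PySem.Dict Int Int) : Int × PySem.Dict Int Int :=
  match fuel with
  | 0 => (N, d)
  | f + 1 =>
      if i ≤ stop then
        if i * i > N then (N, d)
        else
          let p := pvAWhile N.natAbs i N d
          pvALoop f (i + 1) stop p.1 p.2
      else (N, d)

def singlePrimeFactor (N : Int) : Int :=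
  let p := pvALoop (N.natAbs + 1) 2 N N PySem.Dict.empty
  let d := if p.1 ≠ 1 then p.2.insert p.1 1 else p.2
  -- list(disPrimeFact.keys())[0]; the -1 default of getD is unreachable (size = 1 ⇒ a key exists)
  if d.size = 1 then (PySem.List.pyGet? d.keys 0).getD (-1) else -1

-- ===== PORT B =====
-- 'while M % i == 0: M //= i'
def pvBDiv (fuel : Nat) (i M : Int) : Int :=
  match fuel with
  | 0 => M
  | f + 1 =>
      if PySem.Int.mod M i = 0 then pvBDiv f i (PySem.Int.floordiv M i) else M

-- 'while i*i <= N: if N % i == 0: return i; i += 1' — smallest divisor ≥ 2, if any below √N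
def pvBScan (fuel : Nat) (i N : Int) : Option Int :=
  match fuel with
  | 0 => none
  | f + 1 =>
      if i * i ≤ N then
        (if PySem.Int.mod N i = 0 then some i else pvBScan f (i + 1) N)
      else none

def singlePrimeFactor_alt (N : Int) : Int :=
  if N < 2 then (if N = 1 then -1 else N)
  else
    match pvBScan (N.natAbs + 1) 2 N with
    | none => N
    | some p => if pvBDiv N.natAbs p N = 1 then p else -1

-- ===== PRECONDITION & SPEC =====
def Spec_singlePrimeFactor (N : Int) (out : Int) : Prop := out = singlePrimeFactor_alt N
instance (N : Int) (out : Int) : Decidable (Spec_singlePrimeFactor N out) := by unfold Spec_singlePrimeFactor; infer_instance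

-- ===== CLAIM (what is proved, stated in full; the proofs are below) =====
def Claim_equal_singlePrimeFactor : Prop := ∀ (N : Int), Dom_singlePrimeFactor N → Spec_singlePrimeFactor N (singlePrimeFactor N)

-- ===== LEMMAS AND PROOFS =====

-- A's final step, abstracted over the loop result (definitionally A's tail)
def pvFin (p : Int × PySem.Dict Int Int) : Int :=
  let d := if p.1 ≠ 1 then p.2.insert p.1 1 else p.2
  if d.size = 1 then (PySem.List.pyGet? d.keys 0).getD (-1) else -1

lemma pvA_eq_fin (N : Int) :
    singlePrimeFactor N = pvFin (pvALoop (N.natAbs + 1) 2 N N PySem.Dict.empty) := rfl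

lemma pvAWhile_fst (f : Nat) (i : Int) : ∀ (N : Int) (d : PySem.Dict Int Int),
    (pvAWhile f i N d).1 = pvBDiv f i N := by
  induction f with
  | zero => intro N d; rfl
  | succ f ih =>
      intro N d
      simp only [pvAWhile, pvBDiv]
      split
      · exact ih _ _
      · rfl

lemma pvAWhile_snd (f : Nat) (i : Int) : ∀ (N : Int) (d : PySem.Dict Int Int),
    (pvAWhile f i N d).2 =
      if 0 < f ∧ PySem.Int.mod N i = 0 then d.insert i 1 else d := by
  induction f with
  | zero => intro N d; simp [pvAWhile]
  | succ f ih =>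
      intro N d
      simp only [pvAWhile]
      split
      · rename_i h
        rw [ih]
        split
        · rw [PySem.Dict.insert_insert_self]; simp [h]
        · simp [h]
      · rename_i h; simp [h]

lemma pvBDiv_pos_dvd (f : Nat) (i : Int) (hi : 2 ≤ i) : ∀ (N : Int), 1 ≤ N →
    1 ≤ pvBDiv f i N ∧ pvBDiv f i N ∣ N := by
  induction f with
  | zero => intro N hN; exact ⟨hN, dvd_refl N⟩
  | succ f ih =>
      intro N hN
      simp only [pvBDiv]
      split
      · rename_i h
        have hdvd : i ∣ N := (PySem.Int.mod_eq_zero_iff_dvd N i).mp h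
        have hfd : PySem.Int.floordiv N i = N / i :=
          PySem.Int.floordiv_eq_ediv_of_pos (by omega)
        obtain ⟨k, hk⟩ := hdvd
        have hdiv : N / i = k := by rw [hk]; exact Int.mul_ediv_cancel_left k (by omega)
        have hk1 : 1 ≤ k := by nlinarith
        have := ih (PySem.Int.floordiv N i) (by rw [hfd, hdiv]; exact hk1)
        refine ⟨this.1, dvd_trans this.2 ?_⟩
        rw [hfd, hdiv]; exact ⟨i, by linarith [hk]⟩
      · exact ⟨hN, dvd_refl N⟩

lemma pvBDiv_not_dvd (f : Nat) (i : Int) (hi : 2 ≤ i) : ∀ (N : Int), 1 ≤ N →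
    N.natAbs ≤ f → ¬ i ∣ pvBDiv f i N := by
  induction f with
  | zero => intro N hN hf; omega
  | succ f ih =>
      intro N hN hf
      simp only [pvBDiv]
      split
      · rename_i h
        have hdvd : i ∣ N := (PySem.Int.mod_eq_zero_iff_dvd N i).mp h
        have hfd : PySem.Int.floordiv N i = N / i :=
          PySem.Int.floordiv_eq_ediv_of_pos (by omega)
        obtain ⟨k, hk⟩ := hdvd
        have hdiv : N / i = k := by rw [hk]; exact Int.mul_ediv_cancel_left k (by omega)
        have hk1 : 1 ≤ k := by nlinarith
        have hklt : k < N := by nlinarith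
        apply ih
        · rw [hfd, hdiv]; exact hk1
        · rw [hfd, hdiv]; omega
      · rename_i h
        exact fun hd => h ((PySem.Int.mod_eq_zero_iff_dvd N i).mpr hd)

-- once the residual is 1 nothing further happens (i ≥ 2 ⇒ i*i > 1 breaks at once)
lemma pvALoop_one (f : Nat) : ∀ (j stop : Int) (d : PySem.Dict Int Int), 2 ≤ j →
    pvALoop f j stop 1 d = (1, d) := by
  induction f with
  | zero => intro j stop d _; rfl
  | succ f _ =>
      intro j stop d hj
      simp only [pvALoop]
      split
      · have : j * j > 1 := by nlinarith
        simp [this]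
      · rfl

-- continuation invariant: the loop either leaves the state untouched, or some key ≥ j
-- enters the dict; keys already present are never removed
lemma pvALoop_cont (f : Nat) : ∀ (j stop c : Int) (d : PySem.Dict Int Int), 2 ≤ j → 1 ≤ c →
    (((pvALoop f j stop c d).2 = d ∧ (pvALoop f j stop c d).1 = c) ∨
      (∃ q, j ≤ q ∧ q ∈ (pvALoop f j stop c d).2.keys)) ∧
    (∀ k, k ∈ d.keys → k ∈ (pvALoop f j stop c d).2.keys) := by
  induction f with
  | zero => intro j stop c d _ _; exact ⟨Or.inl ⟨rfl, rfl⟩, fun k hk => hk⟩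
  | succ f ih =>
      intro j stop c d hj hc
      simp only [pvALoop]
      split
      · split
        · exact ⟨Or.inl ⟨rfl, rfl⟩, fun k hk => hk⟩
        · rename_i _ hbreak
          by_cases hmod : PySem.Int.mod c j = 0
          · -- j divides c: the inner while inserts j
            have hd' : (pvAWhile c.natAbs j c d).2 = d.insert j 1 := by
              rw [pvAWhile_snd]
              have : 0 < c.natAbs := by omega
              simp [this, hmod]
            have hc' : 1 ≤ (pvAWhile c.natAbs j c d).1 := by
              rw [pvAWhile_fst]; exact (pvBDiv_pos_dvd c.natAbs j hj c hc).1
            have h2 := ih (j + 1) stop (pvAWhile c.natAbs j c d).1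
              (pvAWhile c.natAbs j c d).2 (by omega) hc'
            refine ⟨Or.inr ⟨j, le_refl j, ?_⟩, fun k hk => ?_⟩
            · apply h2.2; rw [hd']
              exact (PySem.Dict.mem_keys_insert _ _ _ _).mpr (Or.inl rfl)
            · apply h2.2; rw [hd']
              exact (PySem.Dict.mem_keys_insert _ _ _ _).mpr (Or.inr hk)
          · -- j does not divide c: state unchanged, go to j+1
            have hd' : (pvAWhile c.natAbs j c d).2 = d := by
              rw [pvAWhile_snd]; simp [hmod]
            have hc' : (pvAWhile c.natAbs j c d).1 = c := by
              rw [pvAWhile_fst]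
              obtain ⟨m, hm⟩ : ∃ m, c.natAbs = m + 1 := ⟨c.natAbs - 1, by omega⟩
              rw [hm]; simp only [pvBDiv]; simp [hmod]
            have h2 := ih (j + 1) stop (pvAWhile c.natAbs j c d).1
              (pvAWhile c.natAbs j c d).2 (by omega) (by rw [hc']; exact hc)
            constructor
            · rcases h2.1 with ⟨he1, he2⟩ | ⟨q, hq1, hq2⟩
              · exact Or.inl ⟨by rw [he1, hd'], by rw [he2, hc']⟩
              · exact Or.inr ⟨q, by omega, hq2⟩
            · intro k hk; apply h2.2; rw [hd']; exact hk
      · exact ⟨Or.inl ⟨rfl, rfl⟩, fun k hk => hk⟩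

lemma two_le_length {l : List Int} {a b : Int} (ha : a ∈ l) (hb : b ∈ l) (hab : a ≠ b) :
    2 ≤ l.length := by
  induction l with
  | nil => simp at ha
  | cons x xs ih =>
      rcases List.mem_cons.mp ha with rfl | ha'
      · rcases List.mem_cons.mp hb with rfl | hb'
        · exact absurd rfl hab
        · have := List.length_pos_of_mem hb'; simp; omega
      · have := List.length_pos_of_mem ha'; simp; omega

lemma pvFin_singleton (i : Int) :
    pvFin (1, PySem.Dict.empty.insert i 1) = i := by
  simp [pvFin, PySem.Dict.size, PySem.Dict.keys, PySem.Dict.items_insert_of_not_contains,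
    PySem.Dict.empty, PySem.List.pyGet?, PySem.List.pyIdx?]

-- the main phase-1 alignment: from column i with residual still N and an empty dict,
-- A's finished value equals B's answer from its scan at the same column
lemma pvMain (f : Nat) : ∀ (i N : Int), 2 ≤ i → 2 ≤ N → N + 2 - i ≤ (f : Int) →
    pvFin (pvALoop f i N N PySem.Dict.empty) =
      (match pvBScan f i N with
        | none => N
        | some p => if pvBDiv N.natAbs p N = 1 then p else -1) := by
  induction f with
  | zero =>
      intro i N _ hN _
      -- both sides are N
      have h1 : pvFin ((N, PySem.Dict.empty) : Int × PySem.Dict Int Int) = N := by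
        have : N ≠ 1 := by omega
        simp [pvFin, this, PySem.Dict.size, PySem.Dict.keys,
          PySem.Dict.items_insert_of_not_contains, PySem.Dict.empty,
          PySem.List.pyGet?, PySem.List.pyIdx?]
      simpa [pvALoop, pvBScan] using h1
  | succ f ih =>
      intro i N hi hN hf
      have hfinN : pvFin ((N, PySem.Dict.empty) : Int × PySem.Dict Int Int) = N := by
        have : N ≠ 1 := by omega
        simp [pvFin, this, PySem.Dict.size, PySem.Dict.keys,
          PySem.Dict.items_insert_of_not_contains, PySem.Dict.empty,
          PySem.List.pyGet?, PySem.List.pyIdx?]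
      by_cases hsq : i * i ≤ N
      · have hiN : i ≤ N := by nlinarith
        by_cases hmod : PySem.Int.mod N i = 0
        · -- first divisor found at i
          simp only [pvALoop, pvBScan, hiN, if_pos, hsq, hmod]
          rw [if_neg (by omega : ¬ i * i > N)]
          have hd' : (pvAWhile N.natAbs i N PySem.Dict.empty).2 = PySem.Dict.empty.insert i 1 := by
            rw [pvAWhile_snd]
            have : 0 < N.natAbs := by omega
            simp [this, hmod]
          have hc' : (pvAWhile N.natAbs i N PySem.Dict.empty).1 = pvBDiv N.natAbs i N := by
            rw [pvAWhile_fst]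
          set r := pvBDiv N.natAbs i N with hr
          have hrpos : 1 ≤ r ∧ r ∣ N := pvBDiv_pos_dvd N.natAbs i hi N (by omega)
          have hndvd : ¬ i ∣ r := pvBDiv_not_dvd N.natAbs i hi N (by omega) (le_refl _)
          rw [hc', hd']
          by_cases hr1 : r = 1
          · rw [hr1, pvALoop_one f (i+1) N _ (by omega), pvFin_singleton]; simp
          · rw [if_neg hr1]
            -- residual r ≥ 2: the dict ends with ≥ 2 keys, so A returns -1
            have hcont := pvALoop_cont f (i + 1) N r (PySem.Dict.empty.insert i 1)
              (by omega) hrpos.1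
            set q' := pvALoop f (i + 1) N r (PySem.Dict.empty.insert i 1) with hq'
            have hiin : i ∈ q'.2.keys := by
              apply hcont.2
              exact (PySem.Dict.mem_keys_insert _ _ _ _).mpr (Or.inl rfl)
            rcases hcont.1 with ⟨he1, he2⟩ | ⟨q, hq1, hq2⟩
            · -- nothing changed: final insert of r ≠ i gives size 2
              have hri : r ≠ i := fun h => hndvd (h ▸ dvd_refl r)
              have hsize : ((PySem.Dict.empty.insert i (1:Int)).insert r 1).size = 2 := by
                have hnc : (PySem.Dict.empty.insert i (1:Int)).contains r = false := by
                  simp [PySem.Dict.contains_insert, PySem.Dict.contains_empty, hri]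
                rw [PySem.Dict.size_insert, if_neg (by simp [hnc]),
                    PySem.Dict.size_insert, if_neg (by simp [PySem.Dict.contains_empty]),
                    PySem.Dict.size_empty]
              simp only [pvFin]
              rw [he2, he1, if_pos hr1]
              split
              · rename_i hcond; exfalso; omega
              · rfl
            · -- a key q ≥ i+1 was added next to i: size ≥ 2 whatever the tail does
              have hqi : q ≠ i := by omega
              simp only [pvFin]
              have hge : 2 ≤ (if q'.1 ≠ 1 then q'.2.insert q'.1 1 else q'.2).size := by
                split
                · have hi2 : i ∈ (q'.2.insert q'.1 1).keys :=
                    (PySem.Dict.mem_keys_insert _ _ _ _).mpr (Or.inr hiin)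
                  have hq2' : q ∈ (q'.2.insert q'.1 1).keys :=
                    (PySem.Dict.mem_keys_insert _ _ _ _).mpr (Or.inr hq2)
                  have := two_le_length hq2' hi2 hqi
                  simpa [PySem.Dict.size, PySem.Dict.keys] using this
                · have := two_le_length hq2 hiin hqi
                  simpa [PySem.Dict.size, PySem.Dict.keys] using this
              rw [if_neg (by omega)]
        · -- i does not divide N: both move to i+1
          simp only [pvALoop, pvBScan]
          rw [if_pos hiN, if_neg (by omega : ¬ i * i > N), if_pos hsq, if_neg hmod]
          have hd' : (pvAWhile N.natAbs i N PySem.Dict.empty).2 = PySem.Dict.empty := by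
            rw [pvAWhile_snd]; simp [hmod]
          have hc' : (pvAWhile N.natAbs i N PySem.Dict.empty).1 = N := by
            rw [pvAWhile_fst]
            obtain ⟨m, hm⟩ : ∃ m, N.natAbs = m + 1 := ⟨N.natAbs - 1, by omega⟩
            rw [hm]; simp only [pvBDiv]; simp [hmod]
          rw [hc', hd']
          exact ih (i + 1) N (by omega) hN (by push_cast at hf ⊢; omega)
      · -- i*i > N: A breaks (or the range is exhausted), B's scan stops: both give N
        have hB : pvBScan (f + 1) i N = none := by
          simp [pvBScan, hsq]
        rw [hB]
        by_cases hiN : i ≤ N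
        · simp only [pvALoop]
          rw [if_pos hiN, if_pos (by omega : i * i > N)]
          exact hfinN
        · simp only [pvALoop]
          rw [if_neg hiN]
          exact hfinN

-- ===== VERDICT (by name: the statement is the Claim_ definition above) =====
theorem singlePrimeFactor_spec : Claim_equal_singlePrimeFactor := by
  intro N _
  unfold Spec_singlePrimeFactor
  by_cases hN : N < 2
  · -- small/negative N: the range is empty on both sides
    have hA : singlePrimeFactor N = if N = 1 then -1 else N := by
      rw [pvA_eq_fin]
      have hloop : pvALoop (N.natAbs + 1) 2 N N PySem.Dict.empty = (N, PySem.Dict.empty) := by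
        simp only [pvALoop]
        rw [if_neg (by omega : ¬ (2:Int) ≤ N)]
      rw [hloop]
      by_cases h1 : N = 1
      · simp [pvFin, h1, PySem.Dict.size, PySem.Dict.empty]
      · simp [pvFin, h1, PySem.Dict.size, PySem.Dict.keys,
          PySem.Dict.items_insert_of_not_contains, PySem.Dict.empty,
          PySem.List.pyGet?, PySem.List.pyIdx?]
    rw [hA, singlePrimeFactor_alt, if_pos hN]
  · -- N ≥ 2: phase-1 alignment lemma
    have hN2 : 2 ≤ N := by omega
    have hcast : ((N.natAbs + 1 : Nat) : Int) = N + 1 := by omega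
    rw [pvA_eq_fin, pvMain (N.natAbs + 1) 2 N (le_refl _) hN2 (by rw [hcast]; omega)]
    rw [singlePrimeFactor_alt, if_neg hN]
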